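-- pv_equiv track=rewrite | github.com/ravpratham/AI-Tutor-Project | backend/rag_service_no_faiss.py | truncate_context
-- ===== SOURCE A (Python) =====
-- from typing import List, Optional
--
-- MAX_CONTEXT_CHARS = 15000
--
-- def truncate_context(chunks_list: List[str], max_chars: int = MAX_CONTEXT_CHARS) -> List[str]:
--     out = []
--     total = 0
--     for c in chunks_list:
--         if total + len(c) <= max_chars:
--             out.append(c)
--             total += len(c)
--         else:
--             remaining = max_chars - total
--             if remaining > 100:
--                 out.append(c[:remaining])
--             break
--     return out
-- ===== SOURCE B (Python) =====
-- MAX_CONTEXT_CHARS = 15000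
--
-- def truncate_context(chunks_list, max_chars=MAX_CONTEXT_CHARS):
--     # Build the cumulative-length table once, then binary-search (bisect_right)
--     # for the number of full chunks that fit, then slice.
--     prefix = []
--     t = 0
--     for c in chunks_list:
--         t += len(c)
--         prefix.append(t)
--     lo, hi = 0, len(prefix)
--     while lo < hi:  # bisect_right(prefix, max_chars) over the nondecreasing table
--         mid = (lo + hi) // 2
--         if prefix[mid] <= max_chars:
--             lo = mid + 1
--         else:
--             hi = mid
--     k = lo
--     out = chunks_list[:k]
--     if k < len(chunks_list):
--         remaining = max_chars - (prefix[k - 1] if k > 0 else 0)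
--         if remaining > 100:
--             out.append(chunks_list[k][:remaining])
--     return out
-- ===== Notes on version B (the rewrite author's own statement) =====
-- stated objective: alternative
-- what changed: Replaces the incremental accumulate-and-break loop with a cumulative-length table, a bisect_right-style binary search for the number of full chunks that fit, and a slice plus optional partial chunk.
import Mathlib
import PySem

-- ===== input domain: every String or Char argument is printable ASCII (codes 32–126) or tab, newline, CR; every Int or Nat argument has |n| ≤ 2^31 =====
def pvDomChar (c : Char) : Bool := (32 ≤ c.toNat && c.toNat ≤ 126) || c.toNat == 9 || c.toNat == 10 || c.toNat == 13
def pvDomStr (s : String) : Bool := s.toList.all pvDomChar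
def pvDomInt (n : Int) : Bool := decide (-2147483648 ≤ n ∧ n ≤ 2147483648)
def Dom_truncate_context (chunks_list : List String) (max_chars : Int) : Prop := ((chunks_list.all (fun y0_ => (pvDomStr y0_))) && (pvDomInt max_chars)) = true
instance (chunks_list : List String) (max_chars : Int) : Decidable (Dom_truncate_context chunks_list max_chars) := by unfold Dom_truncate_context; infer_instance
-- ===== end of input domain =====

-- B rebuilds A's truncation as a cumulative-length table + bisect_right-style binary search + slice
-- (objective: alternative decomposition, same O(n) cost); equivalence of the return values is proved below.

-- ===== PORT A =====
-- A's for-loop with running total, append, and break: the break makes the tail an early return,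
-- so the loop is the obvious structural recursion over the chunks carrying `total`.
def pvLoopA (max_chars : Int) : List String → Int → List String
  | [], _ => []
  | c :: rest, total =>
    if total + PySem.Str.len c ≤ max_chars then
      c :: pvLoopA max_chars rest (total + PySem.Str.len c)
    else
      -- remaining = max_chars - total; c[:remaining] with remaining > 100 > 0
      if 100 < max_chars - total then [PySem.Str.slice c none (some (max_chars - total))] else []

def truncate_context (chunks_list : List String) (max_chars : Int) : List String :=
  pvLoopA max_chars chunks_list 0

-- ===== PORT B =====
-- prefix-table loop: `prefix = []; t = 0; for c: t += len(c); prefix.append(t)`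
def pvPrefixB : List String → List Int → Int → List Int
  | [], acc, _ => acc
  | c :: rest, acc, t => pvPrefixB rest (acc ++ [t + PySem.Str.len c]) (t + PySem.Str.len c)

-- `while lo < hi: mid = (lo+hi)//2; if prefix[mid] <= x: lo = mid+1 else: hi = mid`
-- lo, hi, mid stay in [0, len(prefix)], so Nat with Nat division matches Python's ints and //;
-- prefix[mid] is always in range, ported as getD with default 0.
def pvBsrB (pre : List Int) (x : Int) (lo hi : Nat) : Nat :=
  if h : lo < hi then
    let mid := (lo + hi) / 2
    if pre.getD mid 0 ≤ x then pvBsrB pre x (mid + 1) hi else pvBsrB pre x lo mid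
  else lo
termination_by hi - lo
decreasing_by all_goals omega

def truncate_context_alt (chunks_list : List String) (max_chars : Int) : List String :=
  let pre := pvPrefixB chunks_list [] 0
  let k := pvBsrB pre max_chars 0 pre.length
  let out := PySem.List.slice chunks_list none (some (k : Int))   -- chunks_list[:k]
  if k < chunks_list.length then
    -- prefix[k-1] and chunks_list[k] are in range here; ported as getD
    let remaining := max_chars - (if 0 < k then pre.getD (k - 1) 0 else 0)
    if 100 < remaining then out ++ [PySem.Str.slice (chunks_list.getD k "") none (some remaining)]
    else out
  else out

-- ===== PRECONDITION & SPEC =====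
def Spec_truncate_context (chunks_list : List String) (max_chars : Int) (out : List String) : Prop := out = truncate_context_alt chunks_list max_chars
instance (chunks_list : List String) (max_chars : Int) (out : List String) : Decidable (Spec_truncate_context chunks_list max_chars out) := by unfold Spec_truncate_context; infer_instance

-- ===== CLAIM (what is proved, stated in full; the proofs are below) =====
def Claim_equal_truncate_context : Prop := ∀ (chunks_list : List String) (max_chars : Int), Dom_truncate_context chunks_list max_chars → Spec_truncate_context chunks_list max_chars (truncate_context chunks_list max_chars)

-- ===== LEMMAS AND PROOFS =====

/-- The cumulative-length table, in its natural recursive form (proof-side spec of `pvPrefixB`). -/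
def pvAccum (t : Int) : List String → List Int
  | [] => []
  | c :: rest => (t + PySem.Str.len c) :: pvAccum (t + PySem.Str.len c) rest

lemma pvPrefixB_eq (l : List String) : ∀ (acc : List Int) (t : Int),
    pvPrefixB l acc t = acc ++ pvAccum t l := by
  induction l with
  | nil => intro acc t; simp [pvPrefixB, pvAccum]
  | cons c rest ih => intro acc t; simp [pvPrefixB, pvAccum, ih]

lemma pvAccum_shift (l : List String) : ∀ (a b : Int),
    pvAccum (a + b) l = (pvAccum b l).map (a + ·) := by
  induction l with
  | nil => intro a b; simp [pvAccum]
  | cons c rest ih =>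
    intro a b
    simp only [pvAccum, List.map_cons]
    rw [show a + b + PySem.Str.len c = a + (b + PySem.Str.len c) by ring, ih a (b + PySem.Str.len c)]

lemma le_of_mem_pvAccum (l : List String) : ∀ (t y : Int), y ∈ pvAccum t l → t ≤ y := by
  induction l with
  | nil => intro t y h; simp [pvAccum] at h
  | cons c rest ih =>
    intro t y h
    have hlen : (0 : Int) ≤ PySem.Str.len c := by
      simp [PySem.Str.len_eq]
    simp only [pvAccum, List.mem_cons] at h
    rcases h with h | h
    · omega
    · have := ih (t + PySem.Str.len c) y h; omega

lemma pairwise_pvAccum (l : List String) : ∀ (t : Int), (pvAccum t l).Pairwise (· ≤ ·) := by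
  induction l with
  | nil => intro t; simp [pvAccum]
  | cons c rest ih =>
    intro t
    simp only [pvAccum, List.pairwise_cons]
    exact ⟨fun y hy => le_of_mem_pvAccum rest _ y hy, ih _⟩

/-- bisect_right over a nondecreasing table is the first index whose entry exceeds x. -/
lemma pvBsrB_eq (pre : List Int) (x : Int) (hmono : pre.Pairwise (· ≤ ·)) :
    ∀ (lo hi : Nat), lo ≤ hi → hi ≤ pre.length →
    (∀ i < lo, pre.getD i 0 ≤ x) →
    (∀ i, hi ≤ i → i < pre.length → ¬ pre.getD i 0 ≤ x) →
    pvBsrB pre x lo hi = pre.findIdx (fun v => decide (x < v)) := by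
  have hgetD : ∀ (i : Nat) (h : i < pre.length), pre.getD i 0 = pre[i] := by
    intro i h; simp [List.getD_eq_getElem?_getD, List.getElem?_eq_getElem h]
  have hm : ∀ (i j : Nat) (hi : i < pre.length) (hj : j < pre.length), i ≤ j → pre[i] ≤ pre[j] := by
    intro i j hi hj hij
    rcases Nat.eq_or_lt_of_le hij with rfl | hlt
    · exact le_refl _
    · exact (List.pairwise_iff_getElem.mp hmono) i j hi hj hlt
  intro lo hi
  induction hn : hi - lo using Nat.strong_induction_on generalizing lo hi with
  | _ n ih =>
    intro hlohi hhilen hlo hhi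
    rw [pvBsrB]
    by_cases h : lo < hi
    · simp only [dif_pos h]
      have hmidlt : (lo + hi) / 2 < pre.length := by omega
      by_cases hp : pre.getD ((lo + hi) / 2) 0 ≤ x
      · simp only [if_pos hp]
        refine ih (hi - ((lo + hi) / 2 + 1)) (by omega) _ _ rfl (by omega) hhilen ?_ hhi
        intro i hi'
        rw [hgetD i (by omega)]
        calc pre[i] ≤ pre[(lo + hi) / 2] := hm i _ (by omega) hmidlt (by omega)
          _ ≤ x := by rwa [hgetD _ hmidlt] at hp
      · simp only [if_neg hp]
        refine ih ((lo + hi) / 2 - lo) (by omega) _ _ rfl (by omega) (by omega) hlo ?_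
        intro i hi1 hi2
        rw [hgetD i hi2]
        intro hc
        apply hp
        rw [hgetD _ hmidlt]
        exact le_trans (hm _ i hmidlt hi2 hi1) hc
    · simp only [dif_neg h]
      have hlohi' : lo = hi := by omega
      subst hlohi'
      -- lo pinpoints the boundary; so does findIdx
      set k := pre.findIdx (fun v => decide (x < v)) with hk
      rcases Nat.lt_trichotomy lo k with hlt | heq | hgt
      · exfalso
        have hklen : k ≤ pre.length := List.findIdx_le_length
        have : (fun v => decide (x < v)) pre[lo] = false := List.not_of_lt_findIdx (by omega)
        simp only [decide_eq_false_iff_not, not_lt] at this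
        exact hhi lo (le_refl _) (by omega) (by rw [hgetD lo (by omega)]; exact this)
      · exact heq
      · exfalso
        have hklen : k < pre.length := by omega
        have : (fun v => decide (x < v)) pre[k] = true := List.findIdx_getElem (w := hklen)
        simp only [decide_eq_true_eq] at this
        have := hlo k hgt
        rw [hgetD k hklen] at this
        omega

/-- The table-search-slice pipeline in closed proof-side form. -/
def pvAltSimple (chunks : List String) (M : Int) : List String :=
  let pre := pvAccum 0 chunks
  let k := pre.findIdx (fun v => decide (M < v))
  let out := chunks.take k
  if k < chunks.length then
    let rem := M - (if 0 < k then pre.getD (k - 1) 0 else 0)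
    if 100 < rem then out ++ [PySem.Str.slice (chunks.getD k "") none (some rem)] else out
  else out

lemma length_pvAccum (l : List String) : ∀ t, (pvAccum t l).length = l.length := by
  induction l with
  | nil => intro t; simp [pvAccum]
  | cons c rest ih => intro t; simp [pvAccum, ih]

lemma pvSliceNat {α : Type} (xs : List α) (k : Nat) :
    PySem.List.slice xs none (some (k : Int)) = xs.take k := by
  rw [PySem.List.slice_to xs (Int.natCast_nonneg k), Int.toNat_natCast]

lemma truncate_context_alt_eq (chunks : List String) (M : Int) :
    truncate_context_alt chunks M = pvAltSimple chunks M := by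
  simp only [truncate_context_alt, pvAltSimple, pvPrefixB_eq, List.nil_append]
  rw [pvBsrB_eq (pvAccum 0 chunks) M (pairwise_pvAccum chunks 0) 0 (pvAccum 0 chunks).length
      (by omega) (le_refl _) (by omega) (by omega)]
  rw [pvSliceNat]

lemma pvGetDConsPos (a : Int) (l : List Int) (k : Nat) (h0 : 0 < k) :
    (a :: l).getD k 0 = l.getD (k - 1) 0 := by
  rcases Nat.exists_eq_succ_of_ne_zero (by omega : k ≠ 0) with ⟨m, rfl⟩
  simp

lemma pvGetDMapAdd (a : Int) (l : List Int) (i : Nat) (h : i < l.length) :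
    (l.map (a + ·)).getD i 0 = a + l.getD i 0 := by
  rw [List.getD_eq_getElem?_getD, List.getD_eq_getElem?_getD,
    List.getElem?_map, List.getElem?_eq_getElem h]
  simp

lemma pvAltSimple_cons_le (c : String) (cs : List String) (M : Int)
    (h : PySem.Str.len c ≤ M) :
    pvAltSimple (c :: cs) M = c :: pvAltSimple cs (M - PySem.Str.len c) := by
  unfold pvAltSimple
  simp only [pvAccum, Int.zero_add]
  have hshift : pvAccum (PySem.Str.len c) cs = (pvAccum 0 cs).map (PySem.Str.len c + ·) := by
    have := pvAccum_shift cs (PySem.Str.len c) 0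
    simpa using this
  rw [hshift]
  rw [List.findIdx_cons]
  have hc : (decide (M < PySem.Str.len c)) = false := by
    simp only [decide_eq_false_iff_not, not_lt]; omega
  rw [hc]
  simp only [cond_false]
  rw [List.findIdx_map]
  have hpred : ((fun v => decide (M < v)) ∘ (fun q => PySem.Str.len c + q))
      = (fun v => decide (M - PySem.Str.len c < v)) := by
    funext q; simp only [Function.comp_apply, decide_eq_decide]; omega
  rw [hpred]
  set k' := (pvAccum 0 cs).findIdx (fun v => decide (M - PySem.Str.len c < v)) with hk'
  have hk'len : k' ≤ (pvAccum 0 cs).length := List.findIdx_le_length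
  rw [length_pvAccum] at hk'len
  simp only [List.take_succ_cons, List.length_cons]
  by_cases hklt : k' < cs.length
  · simp only [if_pos (by omega : k' + 1 < cs.length + 1), if_pos hklt]
    have hrem :
        M - (if 0 < k' + 1 then (PySem.Str.len c :: (pvAccum 0 cs).map (PySem.Str.len c + ·)).getD (k' + 1 - 1) 0 else 0)
        = M - PySem.Str.len c - (if 0 < k' then (pvAccum 0 cs).getD (k' - 1) 0 else 0) := by
      simp only [if_pos (by omega : 0 < k' + 1), Nat.add_sub_cancel]
      by_cases h0 : 0 < k'
      · simp only [if_pos h0]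
        have hk1 : k' - 1 < (pvAccum 0 cs).length := by rw [length_pvAccum]; omega
        rw [pvGetDConsPos _ _ k' h0, pvGetDMapAdd _ _ _ hk1]
        ring
      · have h0' : k' = 0 := by omega
        simp only [h0', List.getD_cons_zero]
        norm_num
    rw [hrem]
    by_cases hr : 100 < M - PySem.Str.len c - (if 0 < k' then (pvAccum 0 cs).getD (k' - 1) 0 else 0)
    · simp only [if_pos hr, List.getD_cons_succ, List.cons_append]
    · simp only [if_neg hr]
  · simp only [if_neg (by omega : ¬ (k' + 1 < cs.length + 1)), if_neg hklt]

lemma pvAltSimple_cons_gt (c : String) (cs : List String) (M : Int)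
    (h : ¬ PySem.Str.len c ≤ M) :
    pvAltSimple (c :: cs) M =
      if 100 < M then [PySem.Str.slice c none (some M)] else [] := by
  unfold pvAltSimple
  simp only [pvAccum, Int.zero_add]
  rw [List.findIdx_cons]
  have hc : (decide (M < PySem.Str.len c)) = true := by
    simp only [decide_eq_true_eq]; omega
  rw [hc]
  simp only [cond_true, List.length_cons, List.take_zero]
  simp only [if_pos (by omega : 0 < cs.length + 1), if_neg (by omega : ¬ (0:Nat) < 0)]
  simp only [List.getD_cons_zero, Int.sub_zero, List.nil_append]

lemma pvLoopA_eq (chunks : List String) : ∀ (max_chars total : Int),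
    pvLoopA max_chars chunks total = pvAltSimple chunks (max_chars - total) := by
  induction chunks with
  | nil => intro m t; simp [pvLoopA, pvAltSimple, pvAccum]
  | cons c rest ih =>
    intro m t
    rw [pvLoopA]
    by_cases h : t + PySem.Str.len c ≤ m
    · rw [if_pos h, ih m (t + PySem.Str.len c),
        pvAltSimple_cons_le c rest (m - t) (by omega)]
      congr 1
      ring_nf
    · rw [if_neg h, pvAltSimple_cons_gt c rest (m - t) (by omega)]

-- ===== VERDICT (by name: the statement is the Claim_ definition above) =====
theorem truncate_context_spec : Claim_equal_truncate_context := by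
  intro chunks_list max_chars _
  unfold Spec_truncate_context truncate_context
  rw [truncate_context_alt_eq, pvLoopA_eq]
  norm_num
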